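-- pv_equiv track=rewrite | github.com/Bhaumik-Tandan/Mecor | monitor_final_optimizer.py | extract_current_iteration
-- ===== SOURCE A (Python) =====
-- def extract_current_iteration(logs):
--     """Extract current iteration from logs"""
--     for line in reversed(logs):
--         if "ITERATION" in line:
--             try:
--                 # Extract iteration number
--                 parts = line.split("ITERATION")
--                 if len(parts) > 1:
--                     iteration = parts[1].strip().split()[0]
--                     return int(iteration)
--             except:
--                 pass
--     return 0
-- ===== SOURCE B (Python) =====
-- def _parse_iteration(line):
--     """Return the parsed iteration number of one log line, or None."""
--     if "ITERATION" not in line: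
--         return None
--     try:
--         return int(line.split("ITERATION")[1].strip().split()[0])
--     except:
--         return None
--
--
-- def extract_current_iteration(logs):
--     """Extract current iteration from logs (map/filter pipeline, take last)."""
--     vals = [v for v in map(_parse_iteration, logs) if v is not None]
--     return vals[-1] if vals else 0
-- ===== Notes on version B (the rewrite author's own statement) =====
-- stated objective: alternative
-- what changed: Replaces A's reverse scan with early return by a staged pipeline: map every line to an optional parsed iteration, filter out failures, and return the last collected value (0 if none).
import Mathlib
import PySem

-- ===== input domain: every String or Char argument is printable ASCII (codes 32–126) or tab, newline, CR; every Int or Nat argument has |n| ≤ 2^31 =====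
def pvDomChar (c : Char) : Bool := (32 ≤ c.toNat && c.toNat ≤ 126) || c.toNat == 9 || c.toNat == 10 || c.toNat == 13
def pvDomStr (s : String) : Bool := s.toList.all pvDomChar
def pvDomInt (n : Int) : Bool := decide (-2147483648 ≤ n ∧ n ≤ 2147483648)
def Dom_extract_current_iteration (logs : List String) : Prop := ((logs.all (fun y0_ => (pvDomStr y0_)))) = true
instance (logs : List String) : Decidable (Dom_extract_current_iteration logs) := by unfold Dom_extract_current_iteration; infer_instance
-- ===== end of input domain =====

-- B replaces A's reverse-scan-with-early-return by a staged map/filter pipeline that keeps the last parsed value (alternative decomposition, same cost).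


-- ===== PORT A =====
-- for line in reversed(logs): if "ITERATION" in line: try: … return int(…) except: pass; return 0
def pvGoA : List String → Int
  | [] => 0
  | line :: rest =>
    if PySem.Str.isIn "ITERATION" line then
      let parts := (PySem.Str.split? line "ITERATION").getD []
      if parts.length > 1 then
        match PySem.List.pyGet? parts 1 with
        | none => pvGoA rest            -- IndexError caught: pass
        | some p1 =>
          match PySem.List.pyGet? (PySem.Str.split₀ (PySem.Str.strip p1)) 0 with
          | none => pvGoA rest          -- IndexError caught: pass
          | some w =>
            match PySem.Int.ofStr? w with
            | none => pvGoA rest        -- ValueError caught: pass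
            | some v => v               -- return int(iteration)
      else pvGoA rest
    else pvGoA rest

def extract_current_iteration (logs : List String) : Int := pvGoA logs.reverse

-- ===== PORT B =====
-- def _parse_iteration(line): return parsed int or None
def pvParseIteration (line : String) : Option Int :=
  if PySem.Str.isIn "ITERATION" line then
    match PySem.List.pyGet? ((PySem.Str.split? line "ITERATION").getD []) 1 with
    | none => none
    | some p1 =>
      match PySem.List.pyGet? (PySem.Str.split₀ (PySem.Str.strip p1)) 0 with
      | none => none
      | some w => PySem.Int.ofStr? w
  else none

-- vals = [v for v in map(_parse_iteration, logs) if v is not None]; return vals[-1] if vals else 0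
def extract_current_iteration_alt (logs : List String) : Int :=
  let vals := (logs.map pvParseIteration).filterMap id
  (vals.getLast?).getD 0

-- ===== PRECONDITION & SPEC =====
def Spec_extract_current_iteration (logs : List String) (out : Int) : Prop := out = extract_current_iteration_alt logs
instance (logs : List String) (out : Int) : Decidable (Spec_extract_current_iteration logs out) := by unfold Spec_extract_current_iteration; infer_instance

-- ===== CLAIM (what is proved, stated in full; the proofs are below) =====
def Claim_equal_extract_current_iteration : Prop := ∀ (logs : List String), Dom_extract_current_iteration logs → Spec_extract_current_iteration logs (extract_current_iteration logs)

-- ===== LEMMAS AND PROOFS =====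

-- first successful parse in a list (characterises A's reverse scan)
def pvFind : List String → Option Int
  | [] => none
  | l :: t => match pvParseIteration l with | some v => some v | none => pvFind t

theorem pvGoA_cons (line : String) (rest : List String) :
    pvGoA (line :: rest) = (pvParseIteration line).getD (pvGoA rest) := by
  conv_lhs => unfold pvGoA
  unfold pvParseIteration
  by_cases h : PySem.Str.isIn "ITERATION" line = true
  · simp only [if_pos h]
    by_cases hl : ((PySem.Str.split? line "ITERATION").getD []).length > 1
    · simp only [if_pos hl]
      generalize PySem.List.pyGet? ((PySem.Str.split? line "ITERATION").getD []) 1 = g1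
      cases g1 with
      | none => rfl
      | some p1 =>
        dsimp only
        generalize PySem.List.pyGet? (PySem.Str.split₀ (PySem.Str.strip p1)) 0 = g2
        cases g2 with
        | none => rfl
        | some w =>
          dsimp only
          generalize PySem.Int.ofStr? w = g3
          cases g3 <;> rfl
    · have hnone : PySem.List.pyGet? ((PySem.Str.split? line "ITERATION").getD []) 1 = none := by
        rw [PySem.List.pyGet?_eq_none_iff]
        simp only [PySem.Raise.InRange]
        omega
      rw [if_neg hl, hnone]; rfl
  · rw [if_neg h, if_neg h]; rfl

theorem pvGoA_eq (ys : List String) : pvGoA ys = (pvFind ys).getD 0 := by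
  induction ys with
  | nil => rfl
  | cons line rest ih =>
    rw [pvGoA_cons, ih]
    have hstep : pvFind (line :: rest) =
        match pvParseIteration line with | some v => some v | none => pvFind rest := rfl
    rw [hstep]
    cases pvParseIteration line <;> rfl

theorem pvFind_eq_head (ys : List String) : pvFind ys = (ys.filterMap pvParseIteration).head? := by
  induction ys with
  | nil => rfl
  | cons l t ih =>
    have hstep : pvFind (l :: t) =
        match pvParseIteration l with | some v => some v | none => pvFind t := rfl
    rw [hstep]
    cases h : pvParseIteration l with
    | none => simp [h, ih]
    | some v => simp [h]

-- ===== VERDICT (by name: the statement is the Claim_ definition above) =====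
theorem extract_current_iteration_spec : Claim_equal_extract_current_iteration := by
  intro logs _
  show extract_current_iteration logs = extract_current_iteration_alt logs
  unfold extract_current_iteration extract_current_iteration_alt
  rw [pvGoA_eq, pvFind_eq_head]
  simp [List.filterMap_map, List.getLast?_eq_head?_reverse, ← List.filterMap_reverse]
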